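-- pv_equiv track=rewrite | github.com/sdubee10/Problem-Solving | LeetCode/1961. Check If String Is a Prefix of Array.py | solution
-- ===== SOURCE A (Python) =====
-- def solution(s, words):
--     n = len(words)
--     tmp =""
--     for i in range(n):
--         tmp += words[i]
--         if s == tmp:
--             return True
--     return False
-- ===== SOURCE B (Python) =====
-- def solution(s, words):
--     # Phase 1: scan only word LENGTHS until the cumulative length reaches len(s);
--     # Phase 2: a single join of exactly those words and one comparison.
--     total = 0
--     for k, w in enumerate(words, 1):
--         total += len(w)
--         if total >= len(s):
--             return total == len(s) and "".join(words[:k]) == s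
--     return False
-- ===== Notes on version B (the rewrite author's own statement) =====
-- stated objective: faster
-- what changed: A rebuilds the growing concatenation and compares it whole against s on every iteration; B first scans only the word lengths to find the unique prefix whose total length reaches len(s), then does a single join and one string comparison.
import Mathlib
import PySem

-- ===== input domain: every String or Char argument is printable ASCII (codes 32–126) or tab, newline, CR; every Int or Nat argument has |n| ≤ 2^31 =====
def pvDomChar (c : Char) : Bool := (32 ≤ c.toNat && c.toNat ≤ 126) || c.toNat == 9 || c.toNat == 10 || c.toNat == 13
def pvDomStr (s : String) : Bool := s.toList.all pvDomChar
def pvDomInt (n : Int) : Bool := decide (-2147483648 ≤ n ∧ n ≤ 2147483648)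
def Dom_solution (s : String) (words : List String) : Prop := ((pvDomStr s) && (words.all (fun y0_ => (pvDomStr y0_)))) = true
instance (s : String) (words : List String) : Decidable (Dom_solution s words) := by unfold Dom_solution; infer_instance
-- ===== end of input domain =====

-- B scans only word lengths to locate the one candidate prefix count, then does a single join and one comparison, instead of rebuilding and re-comparing the concatenation each step (objective: faster).

-- ===== PORT A =====
-- A's loop: tmp += words[i]; if s == tmp: return True — recursion over the word list carrying tmp (as List Char).
def solutionGoA (sl : List Char) (ws : List String) (tmp : List Char) : Bool :=
  match ws with
  | [] => false
  | w :: rest =>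
      let tmp' := tmp ++ w.toList
      if sl = tmp' then true else solutionGoA sl rest tmp'

def solution (s : String) (words : List String) : Bool :=
  solutionGoA s.toList words []

-- ===== PORT B =====
-- B's loop over enumerate(words, 1): total += len(w); once total >= len(s),
-- return total == len(s) and "".join(words[:k]) == s.
def solutionGoB (sl : List Char) (words : List String) (total k : Nat) (ws : List String) : Bool :=
  match ws with
  | [] => false
  | w :: t =>
      let total' := total + w.toList.length
      if sl.length ≤ total' then
        decide (total' = sl.length) && decide (((words.take k).map String.toList).flatten = sl)
      else solutionGoB sl words total' (k + 1) t

def solution_alt (s : String) (words : List String) : Bool :=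
  solutionGoB s.toList words 0 1 words

-- ===== PRECONDITION & SPEC =====
def Spec_solution (s : String) (words : List String) (out : Bool) : Prop := out = solution_alt s words
instance (s : String) (words : List String) (out : Bool) : Decidable (Spec_solution s words out) := by unfold Spec_solution; infer_instance

-- ===== CLAIM (what is proved, stated in full; the proofs are below) =====
def Claim_equal_solution : Prop := ∀ (s : String) (words : List String), Dom_solution s words → Spec_solution s words (solution s words)

-- ===== LEMMAS AND PROOFS =====

-- Once tmp is not a prefix of sl, A's loop can never produce True.
theorem solutionGoA_notPrefix (ws : List String) :
    ∀ (sl tmp : List Char), ¬ tmp <+: sl → solutionGoA sl ws tmp = false := by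
  induction ws with
  | nil => intro sl tmp _; rfl
  | cons w t ih =>
      intro sl tmp h
      simp only [solutionGoA]
      rw [if_neg (fun he => h (by rw [he]; exact List.prefix_append _ _))]
      exact ih sl (tmp ++ w.toList) (fun hp => h ((List.prefix_append tmp w.toList).trans hp))

-- Invariant: after consuming `consumed`, A's tmp is flatten consumed, B's total its
-- length and B's k = consumed.length + 1.
theorem go_eq (sl : List Char) (ws : List String) :
    ∀ (consumed : List String),
      solutionGoA sl ws ((consumed.map String.toList).flatten) =
      solutionGoB sl (consumed ++ ws) ((consumed.map String.toList).flatten).length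
        (consumed.length + 1) ws := by
  induction ws with
  | nil => intro consumed; rfl
  | cons w t ih =>
      intro consumed
      set tmp := (consumed.map String.toList).flatten with htmp
      have htake : ((consumed ++ w :: t).take (consumed.length + 1)) = consumed ++ [w] := by
        rw [List.take_append]
        simp
      have hflat : (((consumed ++ [w]).map String.toList).flatten) = tmp ++ w.toList := by
        simp [htmp]
      simp only [solutionGoA, solutionGoB]
      by_cases hle : sl.length ≤ tmp.length + w.toList.length
      · rw [if_pos hle, htake, hflat]
        by_cases heq : sl = tmp ++ w.toList
        · rw [if_pos heq]
          subst heq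
          simp
        · rw [if_neg heq]
          have hA : solutionGoA sl t (tmp ++ w.toList) = false := by
            apply solutionGoA_notPrefix
            intro hp
            have hlen : sl.length ≤ (tmp ++ w.toList).length := by
              simpa using hle
            exact heq (hp.eq_of_length_le hlen).symm
          rw [hA]
          have hne : ¬ (tmp ++ w.toList = sl) := fun h => heq h.symm
          simp [hne]
      · rw [if_neg hle]
        have hne : ¬ (sl = tmp ++ w.toList) := by
          intro h; apply hle; rw [h]; simp
        rw [if_neg hne]
        have := ih (consumed ++ [w])
        rw [hflat] at this
        simpa using this

-- ===== VERDICT (by name: the statement is the Claim_ definition above) =====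
theorem solution_spec : Claim_equal_solution := by
  intro s words _
  unfold Spec_solution solution solution_alt
  simpa using go_eq s.toList words []
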